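-- pv_equiv track=rewrite | github.com/vahrina/steamflow | steamflow/ui_commands.py | _extract_query_suffix
-- ===== SOURCE A (Python) =====
-- def _extract_query_suffix(search_term, aliases):
--     raw_value = str(search_term or "").strip()
--     normalized = raw_value.lower()
--     for alias in sorted(set(aliases), key=len, reverse=True):
--         if normalized == alias:
--             return ""
--         prefix = f"{alias} "
--         if normalized.startswith(prefix):
--             return raw_value[len(prefix) :].strip()
--     return None
-- ===== SOURCE B (Python) =====
-- def _extract_query_suffix(search_term, aliases):
--     raw_value = str(search_term or "").strip()
--     normalized = raw_value.lower()
--     best = None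
--     for alias in aliases:
--         if normalized == alias or normalized.startswith(alias + " "):
--             if best is None or len(alias) > len(best):
--                 best = alias
--     if best is None:
--         return None
--     if best == normalized:
--         return ""
--     return raw_value[len(best) + 1:].strip()
-- ===== Notes on version B (the rewrite author's own statement) =====
-- stated objective: simpler
-- what changed: Replaces dedup-then-sort-by-length-then-first-match with a single pass over the aliases keeping the longest matching alias (matching aliases have pairwise distinct lengths, so the longest match equals the first match of the length-descending scan).
import Mathlib
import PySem

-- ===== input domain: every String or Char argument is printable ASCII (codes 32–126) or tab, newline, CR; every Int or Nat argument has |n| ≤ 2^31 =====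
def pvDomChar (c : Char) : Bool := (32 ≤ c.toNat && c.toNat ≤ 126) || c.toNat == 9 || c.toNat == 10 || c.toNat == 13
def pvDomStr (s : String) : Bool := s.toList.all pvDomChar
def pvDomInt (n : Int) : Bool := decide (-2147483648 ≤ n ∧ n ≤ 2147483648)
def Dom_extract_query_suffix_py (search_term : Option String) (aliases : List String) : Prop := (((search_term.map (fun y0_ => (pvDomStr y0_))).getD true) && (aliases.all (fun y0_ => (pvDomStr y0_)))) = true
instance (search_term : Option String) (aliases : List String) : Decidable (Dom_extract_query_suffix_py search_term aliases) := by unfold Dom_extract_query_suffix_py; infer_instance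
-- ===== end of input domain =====

-- B replaces A's dedup + length-descending sort + first-match scan by a single fold over the
-- aliases keeping the longest matching alias (objective: simpler; matching aliases have pairwise
-- distinct lengths, so the longest match is the first match of the sorted scan).


-- ===== PORT A =====
-- the for-loop of A: first alias that matches decides the result
def pvALoop (raw_value normalized : String) : List String → Option String
  | [] => none
  | alias0 :: rest =>
    if normalized == alias0 then some ""
    else
      let prefix0 := alias0 ++ " "
      if PySem.Str.startswith normalized prefix0 then
        some (PySem.Str.strip (PySem.Str.slice raw_value (some (PySem.Str.len prefix0)) none))
      else pvALoop raw_value normalized rest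

def extract_query_suffix_py (search_term : Option String) (aliases : List String) : Option String :=
  -- str(search_term or ""): None ↦ "", and "" is falsy with ("" or "") = "" — so Option.getD "" is exact
  let raw_value := PySem.Str.strip (search_term.getD "")
  let normalized := PySem.Str.lower raw_value
  pvALoop raw_value normalized
    (PySem.List.sorted (PySem.Set.ofList aliases) PySem.Str.len true)

-- ===== PORT B =====
-- one fold step of B: keep the longest matching alias seen so far
def pvBStep (normalized : String) (best : Option String) (alias0 : String) : Option String :=
  if normalized == alias0 || PySem.Str.startswith normalized (alias0 ++ " ") then
    match best with
    | none => some alias0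
    | some b => if PySem.Str.len b < PySem.Str.len alias0 then some alias0 else some b
  else best

def extract_query_suffix_py_alt (search_term : Option String) (aliases : List String) : Option String :=
  let raw_value := PySem.Str.strip (search_term.getD "")
  let normalized := PySem.Str.lower raw_value
  match aliases.foldl (pvBStep normalized) none with
  | none => none
  | some best =>
    if best == normalized then some ""
    else some (PySem.Str.strip (PySem.Str.slice raw_value (some (PySem.Str.len best + 1)) none))

-- ===== PRECONDITION & SPEC =====
def Spec_extract_query_suffix_py (search_term : Option String) (aliases : List String) (out : Option String) : Prop := out = extract_query_suffix_py_alt search_term aliases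
instance (search_term : Option String) (aliases : List String) (out : Option String) : Decidable (Spec_extract_query_suffix_py search_term aliases out) := by unfold Spec_extract_query_suffix_py; infer_instance

-- ===== CLAIM (what is proved, stated in full; the proofs are below) =====
def Claim_equal_extract_query_suffix_py : Prop := ∀ (search_term : Option String) (aliases : List String), Dom_extract_query_suffix_py search_term aliases → Spec_extract_query_suffix_py search_term aliases (extract_query_suffix_py search_term aliases)

-- ===== LEMMAS AND PROOFS =====

-- an alias matches: it equals the normalized term, or alias + " " is a prefix of it
def pvIsMatch (normalized alias0 : String) : Bool :=
  normalized == alias0 || PySem.Str.startswith normalized (alias0 ++ " ")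

-- the value either program produces once the chosen alias is fixed
def pvOut (raw_value normalized alias0 : String) : Option String :=
  if normalized == alias0 then some ""
  else some (PySem.Str.strip (PySem.Str.slice raw_value (some (PySem.Str.len alias0 + 1)) none))

theorem pvLen_append_space (a : String) : PySem.Str.len (a ++ " ") = PySem.Str.len a + 1 := by
  simp [PySem.Str.len]

-- B's step, case-split along pvIsMatch and the accumulator
theorem pvBStep_skip (n a : String) (acc : Option String) (hm : pvIsMatch n a = false) :
    pvBStep n acc a = acc := by
  unfold pvBStep
  rw [show (n == a || PySem.Str.startswith n (a ++ " ")) = pvIsMatch n a from rfl, hm]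
  simp

theorem pvBStep_new (n a : String) (hm : pvIsMatch n a = true) :
    pvBStep n none a = some a := by
  unfold pvBStep
  rw [show (n == a || PySem.Str.startswith n (a ++ " ")) = pvIsMatch n a from rfl, hm]
  simp

theorem pvBStep_keep (n a b : String) (hm : pvIsMatch n a = true) :
    pvBStep n (some b) a =
      if PySem.Str.len b < PySem.Str.len a then some a else some b := by
  unfold pvBStep
  rw [show (n == a || PySem.Str.startswith n (a ++ " ")) = pvIsMatch n a from rfl, hm]
  simp

theorem pvALoop_eq_find (raw n : String) (L : List String) :
    pvALoop raw n L =
      match L.find? (pvIsMatch n) with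
      | none => none
      | some a => pvOut raw n a := by
  induction L with
  | nil => rfl
  | cons a rest ih =>
    have hdef : pvALoop raw n (a :: rest) =
        if n == a then some ""
        else if PySem.Str.startswith n (a ++ " ") then
          some (PySem.Str.strip (PySem.Str.slice raw (some (PySem.Str.len (a ++ " "))) none))
        else pvALoop raw n rest := rfl
    rw [hdef, List.find?_cons]
    by_cases h1 : (n == a) = true
    · have hm : pvIsMatch n a = true := by
        simp only [pvIsMatch, Bool.or_eq_true]; exact Or.inl h1
      rw [if_pos h1, hm]
      simp only [pvOut]
      rw [if_pos h1]
    · rw [if_neg h1]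
      by_cases h2 : PySem.Str.startswith n (a ++ " ") = true
      · have hm : pvIsMatch n a = true := by
          simp only [pvIsMatch, Bool.or_eq_true]; exact Or.inr h2
        rw [if_pos h2, hm]
        simp only [pvOut]
        rw [if_neg h1, pvLen_append_space]
      · have hm : pvIsMatch n a = false := by
          simp only [pvIsMatch, Bool.or_eq_false_iff]
          exact ⟨by simpa using h1, by simpa using h2⟩
        rw [if_neg h2, hm, ih]

-- two matching aliases of equal length are equal
theorem pvMatch_uniq (n a b : String)
    (ha : pvIsMatch n a = true) (hb : pvIsMatch n b = true)
    (hlen : a.length = b.length) : a = b := by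
  simp only [pvIsMatch, Bool.or_eq_true, beq_iff_eq, PySem.Str.startswith_eq,
    PySem.Chars.startswith_iff] at ha hb
  have htl : (a ++ " ").toList = a.toList ++ [' '] := by simp
  have htlb : (b ++ " ").toList = b.toList ++ [' '] := by simp
  rcases ha with ha | ha <;> rcases hb with hb | hb
  · exact ha.symm.trans hb
  · exfalso
    rw [htlb] at hb
    have hlb := hb.length_le
    simp at hlb
    subst ha
    omega
  · exfalso
    rw [htl] at ha
    have hla := ha.length_le
    simp at hla
    subst hb
    omega
  · rw [htl] at ha; rw [htlb] at hb
    have hle : a.toList ++ [' '] <+: b.toList ++ [' '] :=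
      List.prefix_of_prefix_length_le ha hb (by simp [hlen])
    have heq : a.toList ++ [' '] = b.toList ++ [' '] :=
      List.IsPrefix.eq_of_length hle (by simp [hlen])
    exact String.toList_inj.mp (List.append_cancel_right heq)

-- invariant of B's fold: the accumulator is a longest match seen so far
theorem pvFold_inv (n : String) (l : List String) :
    ∀ (acc : Option String), (∀ b, acc = some b → pvIsMatch n b = true) →
    (l.foldl (pvBStep n) acc = none ↔ acc = none ∧ ∀ a ∈ l, pvIsMatch n a = false) ∧
    (∀ r, l.foldl (pvBStep n) acc = some r →
       pvIsMatch n r = true ∧ (acc = some r ∨ r ∈ l) ∧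
       (∀ a ∈ l, pvIsMatch n a = true → PySem.Str.len a ≤ PySem.Str.len r) ∧
       (∀ b, acc = some b → PySem.Str.len b ≤ PySem.Str.len r)) := by
  induction l with
  | nil =>
    intro acc hacc
    refine ⟨by cases acc <;> simp, ?_⟩
    intro r hr
    simp only [List.foldl_nil] at hr
    refine ⟨hacc r hr, Or.inl hr, by simp, ?_⟩
    intro b hb
    rw [hb] at hr
    rw [Option.some.inj hr]
  | cons a rest ih =>
    intro acc hacc
    have hstep : ∀ b, pvBStep n acc a = some b → pvIsMatch n b = true := by
      intro b hb
      by_cases hm : pvIsMatch n a = true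
      · cases acc with
        | none =>
          rw [pvBStep_new n a hm] at hb
          exact (Option.some.inj hb) ▸ hm
        | some c =>
          rw [pvBStep_keep n a c hm] at hb
          by_cases hlt : PySem.Str.len c < PySem.Str.len a
          · rw [if_pos hlt] at hb; exact (Option.some.inj hb) ▸ hm
          · rw [if_neg hlt] at hb; exact (Option.some.inj hb) ▸ hacc c rfl
      · rw [pvBStep_skip n a acc (by simpa using hm)] at hb
        exact hacc b hb
    obtain ⟨ihn, ihs⟩ := ih (pvBStep n acc a) hstep
    -- the step never loses the accumulator's length
    have hgrow : ∀ b, acc = some b → ∃ c, pvBStep n acc a = some c ∧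
        PySem.Str.len b ≤ PySem.Str.len c := by
      intro b hb
      subst hb
      by_cases hm : pvIsMatch n a = true
      · rw [pvBStep_keep n a b hm]
        by_cases hlt : PySem.Str.len b < PySem.Str.len a
        · exact ⟨a, by rw [if_pos hlt], le_of_lt hlt⟩
        · exact ⟨b, by rw [if_neg hlt], le_refl _⟩
      · exact ⟨b, pvBStep_skip n a _ (by simpa using hm), le_refl _⟩
    constructor
    · rw [List.foldl_cons, ihn]
      constructor
      · rintro ⟨h1, h2⟩
        by_cases hm : pvIsMatch n a = true
        · exfalso
          cases acc with
          | none => rw [pvBStep_new n a hm] at h1; cases h1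
          | some c =>
            rw [pvBStep_keep n a c hm] at h1
            by_cases hlt : PySem.Str.len c < PySem.Str.len a
            · rw [if_pos hlt] at h1; cases h1
            · rw [if_neg hlt] at h1; cases h1
        · rw [pvBStep_skip n a acc (by simpa using hm)] at h1
          refine ⟨h1, ?_⟩
          intro x hx
          rcases List.mem_cons.mp hx with hx | hx
          · subst hx; simpa using hm
          · exact h2 x hx
      · rintro ⟨h1, h2⟩
        subst h1
        have hm : pvIsMatch n a = false := h2 a (by simp)
        exact ⟨pvBStep_skip n a none hm, fun x hx => h2 x (List.mem_cons_of_mem _ hx)⟩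
    · intro r hr
      rw [List.foldl_cons] at hr
      obtain ⟨hr1, hr2, hr3, hr4⟩ := ihs r hr
      refine ⟨hr1, ?_, ?_, ?_⟩
      · rcases hr2 with hr2 | hr2
        · by_cases hm : pvIsMatch n a = true
          · cases acc with
            | none =>
              rw [pvBStep_new n a hm] at hr2
              right
              rw [← Option.some.inj hr2]
              exact List.mem_cons_self
            | some c =>
              rw [pvBStep_keep n a c hm] at hr2
              by_cases hlt : PySem.Str.len c < PySem.Str.len a
              · rw [if_pos hlt] at hr2
                right
                rw [← Option.some.inj hr2]
                exact List.mem_cons_self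
              · rw [if_neg hlt] at hr2
                left
                rw [Option.some.inj hr2]
          · rw [pvBStep_skip n a acc (by simpa using hm)] at hr2
            left; exact hr2
        · right; exact List.mem_cons_of_mem _ hr2
      · intro x hx hxm
        rcases List.mem_cons.mp hx with hx | hx
        · subst hx
          have hmem : ∃ c, pvBStep n acc x = some c ∧
              PySem.Str.len x ≤ PySem.Str.len c := by
            cases acc with
            | none => exact ⟨x, pvBStep_new n x hxm, le_refl _⟩
            | some c =>
              rw [pvBStep_keep n x c hxm]
              by_cases hlt : PySem.Str.len c < PySem.Str.len x
              · exact ⟨x, by rw [if_pos hlt], le_refl _⟩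
              · exact ⟨c, by rw [if_neg hlt], by omega⟩
          obtain ⟨c, hc1, hc2⟩ := hmem
          exact le_trans hc2 (hr4 c hc1)
        · exact hr3 x hx hxm
      · intro b hb
        obtain ⟨c, hc1, hc2⟩ := hgrow b hb
        exact le_trans hc2 (hr4 c hc1)

-- maximality of the first match in the length-descending sorted list
theorem pvFind_max (al : List String) (n a : String)
    (h : (PySem.List.sorted (PySem.Set.ofList al) PySem.Str.len true).find? (pvIsMatch n) = some a) :
    a ∈ al ∧ pvIsMatch n a = true ∧
      ∀ b ∈ al, pvIsMatch n b = true → PySem.Str.len b ≤ PySem.Str.len a := by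
  set S := PySem.List.sorted (PySem.Set.ofList al) PySem.Str.len true with hS
  obtain ⟨hpa, as, bs, hsplit, hpre⟩ := List.find?_eq_some_iff_append.mp h
  have hmemS : a ∈ S := by rw [hsplit]; simp
  have hmem : a ∈ al := by
    rw [hS, PySem.List.mem_sorted, PySem.Set.mem_ofList] at hmemS; exact hmemS
  refine ⟨hmem, hpa, ?_⟩
  intro b hb hbm
  have hbS : b ∈ S := by rw [hS, PySem.List.mem_sorted, PySem.Set.mem_ofList]; exact hb
  have hpw : S.Pairwise (fun x y => PySem.Str.len y ≤ PySem.Str.len x) :=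
    PySem.List.sorted_pairwise_rev _ _
  rw [hsplit] at hbS hpw
  rcases List.mem_append.mp hbS with hbas | hbcons
  · exact absurd hbm (by simpa using hpre b hbas)
  · rcases List.mem_cons.mp hbcons with hba | hbbs
    · subst hba; exact le_refl _
    · have hpc := (List.pairwise_append.mp hpw).2.1
      exact (List.pairwise_cons.mp hpc).1 b hbbs

theorem pvLen_eq_of_le (a b : String)
    (h1 : PySem.Str.len a ≤ PySem.Str.len b) (h2 : PySem.Str.len b ≤ PySem.Str.len a) :
    a.length = b.length := by
  simp [PySem.Str.len] at h1 h2
  omega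

-- the heart of the equivalence, with the shared raw/normalized strings abstracted
theorem pvMain (raw n : String) (aliases : List String) :
    (match (PySem.List.sorted (PySem.Set.ofList aliases) PySem.Str.len true).find? (pvIsMatch n) with
      | none => (none : Option String)
      | some a => pvOut raw n a) =
    (match aliases.foldl (pvBStep n) none with
      | none => none
      | some best =>
        if best == n then some ""
        else some (PySem.Str.strip (PySem.Str.slice raw (some (PySem.Str.len best + 1)) none))) := by
  obtain ⟨hBnone, hBsome⟩ := pvFold_inv n aliases none (by intro b hb; cases hb)
  cases hF : aliases.foldl (pvBStep n) none with
  | none =>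
    have hno := (hBnone.mp hF).2
    have hfind : (PySem.List.sorted (PySem.Set.ofList aliases) PySem.Str.len true).find?
        (pvIsMatch n) = none := by
      rw [List.find?_eq_none]
      intro x hx
      rw [PySem.List.mem_sorted, PySem.Set.mem_ofList] at hx
      simp [hno x hx]
    rw [hfind]
  | some r =>
    obtain ⟨hr1, hr2, hr3, -⟩ := hBsome r hF
    have hrmem : r ∈ aliases := by
      rcases hr2 with h | h
      · cases h
      · exact h
    cases hfind : (PySem.List.sorted (PySem.Set.ofList aliases) PySem.Str.len true).find?
        (pvIsMatch n) with
    | none =>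
      exfalso
      exact absurd hr1 (by
        simpa using List.find?_eq_none.mp hfind r
          (by rw [PySem.List.mem_sorted, PySem.Set.mem_ofList]; exact hrmem))
    | some a =>
      obtain ⟨hamem, ham, hamax⟩ := pvFind_max aliases n a hfind
      have heq : a = r :=
        pvMatch_uniq n a r ham hr1 (pvLen_eq_of_le a r (hr3 a hamem ham) (hamax r hrmem hr1))
      subst heq
      simp only [pvOut]
      by_cases hcase : n = a
      · rw [if_pos (beq_iff_eq.mpr hcase), if_pos (beq_iff_eq.mpr hcase.symm)]
      · rw [if_neg (by simpa using hcase), if_neg (by simpa using (Ne.symm hcase))]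

-- ===== VERDICT (by name: the statement is the Claim_ definition above) =====
theorem extract_query_suffix_py_spec : Claim_equal_extract_query_suffix_py := by
  intro search_term aliases _
  unfold Spec_extract_query_suffix_py
  show extract_query_suffix_py search_term aliases = extract_query_suffix_py_alt search_term aliases
  simp only [extract_query_suffix_py, extract_query_suffix_py_alt]
  rw [pvALoop_eq_find]
  exact pvMain _ _ aliases
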